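-- pv_equiv track=rewrite | github.com/leefurong/pubg | telemetriesSaver.py | getHeadList
-- ===== SOURCE A (Python) =====
-- def getHeadList(listOfDict):
--     head = set()
--     for item in listOfDict:
--         for k in item:
--             head.add(k)
--     head = list(head)
--     head.sort()
--     return head
-- ===== SOURCE B (Python) =====
-- def getHeadList(listOfDict):
--     keys = []
--     for item in listOfDict:
--         keys.extend(item)  # iterating a dict yields its keys
--     keys.sort()
--     head = []
--     for k in keys:
--         if not head or head[-1] != k:
--             head.append(k)
--     return head
-- ===== Notes on version B (the rewrite author's own statement) =====
-- stated objective: alternative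
-- what changed: replaces the hash-set accumulation with flatten-all-keys, one sort of the full key list, then a single adjacent-duplicate-removal pass
import Mathlib
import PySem

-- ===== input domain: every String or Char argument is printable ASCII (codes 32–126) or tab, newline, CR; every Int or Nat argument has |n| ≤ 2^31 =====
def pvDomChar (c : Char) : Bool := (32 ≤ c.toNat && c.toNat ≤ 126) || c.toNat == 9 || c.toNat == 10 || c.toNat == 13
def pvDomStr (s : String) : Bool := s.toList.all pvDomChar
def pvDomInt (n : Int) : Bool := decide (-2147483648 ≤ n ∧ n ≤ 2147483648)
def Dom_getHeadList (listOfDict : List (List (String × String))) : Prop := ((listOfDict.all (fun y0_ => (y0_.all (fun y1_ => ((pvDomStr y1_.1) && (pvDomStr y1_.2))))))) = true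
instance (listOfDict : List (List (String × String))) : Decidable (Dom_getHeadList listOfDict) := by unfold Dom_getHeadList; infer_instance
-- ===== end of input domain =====

-- B replaces A's hash-set accumulation by flatten-sort-then-adjacent-dedup (alternative decomposition, same result).

-- ===== PORT A =====
def getHeadList (listOfDict : List (List (String × String))) : List String :=
  let head : PySem.Set String :=
    listOfDict.foldl (fun head item =>
      item.foldl (fun head kv => PySem.Set.add head kv.1) head) PySem.Set.empty
  PySem.List.sorted head (fun x => x) false

-- ===== PORT B =====
def getHeadList_alt (listOfDict : List (List (String × String))) : List String :=
  let keys : List String :=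
    listOfDict.foldl (fun keys item => keys ++ item.map Prod.fst) []
  let keys := PySem.List.sorted keys (fun x => x) false
  keys.foldl (fun head k =>
    if head = [] ∨ head.getLast? ≠ some k then head ++ [k] else head) []

-- ===== PRECONDITION & SPEC =====
def Spec_getHeadList (listOfDict : List (List (String × String))) (out : List String) : Prop := out = getHeadList_alt listOfDict
instance (listOfDict : List (List (String × String))) (out : List String) : Decidable (Spec_getHeadList listOfDict out) := by unfold Spec_getHeadList; infer_instance

-- ===== CLAIM (what is proved, stated in full; the proofs are below) =====
def Claim_equal_getHeadList : Prop := ∀ (listOfDict : List (List (String × String))), Dom_getHeadList listOfDict → Spec_getHeadList listOfDict (getHeadList listOfDict)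

-- ===== LEMMAS AND PROOFS =====

-- The nested Set.add fold of A equals folding Set.add over the flattened key list built by B.
theorem pv_setFold_eq (l : List (List (String × String))) (s : PySem.Set String) :
    l.foldl (fun h item => item.foldl (fun h kv => PySem.Set.add h kv.1) h) s
      = (l.flatMap (fun item => item.map Prod.fst)).foldl PySem.Set.add s := by
  induction l generalizing s with
  | nil => rfl
  | cons item rest ih =>
      simp only [List.foldl_cons, List.flatMap_cons, List.foldl_append, ih, List.foldl_map]

-- B's flat key list is the flatMap of the per-dict key lists.
theorem pv_flat_eq (l : List (List (String × String))) :
    l.foldl (fun keys item => keys ++ item.map Prod.fst) []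
      = l.flatMap (fun item => item.map Prod.fst) := by
  simpa using PySem.List.foldl_append_eq_flatMap (g := fun item => item.map Prod.fst) (l := l) (acc := [])

-- Every member of a strictly increasing list is ≤ its last element.
theorem pv_le_getLast {l : List String} {a : String} (ha : a ∈ l) (hp : l.Pairwise (· < ·)) :
    ∃ m, l.getLast? = some m ∧ a ≤ m := by
  induction l generalizing a with
  | nil => cases ha
  | cons x t ih =>
      cases t with
      | nil =>
          simp only [List.mem_singleton] at ha
          exact ⟨x, by simp [ha]⟩
      | cons y u =>
          have hp' : (y :: u).Pairwise (· < ·) := hp.of_cons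
          have hx : ∀ b ∈ y :: u, x < b := by
            intro b hb; exact (List.pairwise_cons.mp hp).1 b hb
          rcases List.mem_cons.mp ha with rfl | hmem
          · obtain ⟨m, hm, hym⟩ := ih (List.mem_cons_self) hp'
            exact ⟨m, by simpa using hm, le_of_lt (lt_of_lt_of_le (hx y List.mem_cons_self) hym)⟩
          · obtain ⟨m, hm, ham⟩ := ih hmem hp'
            exact ⟨m, by simpa using hm, ham⟩

-- Invariant of B's adjacent-dedup fold over a ≤-sorted list.
theorem pv_dedup_spec (s : List String) :
    ∀ acc : List String, s.Pairwise (· ≤ ·) → acc.Pairwise (· < ·) →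
    (∀ a ∈ acc, ∀ b ∈ s, a ≤ b) →
    (s.foldl (fun head k => if head = [] ∨ head.getLast? ≠ some k then head ++ [k] else head) acc).Pairwise (· < ·)
    ∧ ∀ x, x ∈ s.foldl (fun head k => if head = [] ∨ head.getLast? ≠ some k then head ++ [k] else head) acc
        ↔ x ∈ acc ∨ x ∈ s := by
  induction s with
  | nil => intro acc _ hacc _; simpa using hacc
  | cons b rest ih =>
      intro acc hs hacc hlink
      have hb_rest : ∀ c ∈ rest, b ≤ c := (List.pairwise_cons.mp hs).1
      have hs' : rest.Pairwise (· ≤ ·) := hs.of_cons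
      simp only [List.foldl_cons]
      by_cases hcond : acc = [] ∨ acc.getLast? ≠ some b
      · rw [if_pos hcond]
        have hlt : ∀ a ∈ acc, a < b := by
          intro a ha
          have hle : a ≤ b := hlink a ha b List.mem_cons_self
          rcases lt_or_eq_of_le hle with h | rfl
          · exact h
          · exfalso
            obtain ⟨m, hm, ham⟩ := pv_le_getLast ha hacc
            have hmb : m ≤ a := hlink m (List.mem_of_getLast? hm) a List.mem_cons_self
            have : m = a := le_antisymm hmb ham
            rcases hcond with h0 | hne
            · simp [h0] at hm
            · exact hne (this ▸ hm)
        have hacc' : (acc ++ [b]).Pairwise (· < ·) := by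
          rw [List.pairwise_append]
          exact ⟨hacc, List.pairwise_singleton _ _, by
            intro a ha c hc; rw [List.mem_singleton] at hc; exact hc ▸ hlt a ha⟩
        have hlink' : ∀ a ∈ acc ++ [b], ∀ c ∈ rest, a ≤ c := by
          intro a ha c hc
          rcases List.mem_append.mp ha with ha | ha
          · exact hlink a ha c (List.mem_cons_of_mem _ hc)
          · rw [List.mem_singleton] at ha; exact ha ▸ hb_rest c hc
        obtain ⟨h1, h2⟩ := ih (acc ++ [b]) hs' hacc' hlink'
        refine ⟨h1, fun x => ?_⟩
        rw [h2 x]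
        simp [List.mem_append, List.mem_cons, or_assoc, or_comm, or_left_comm]
      · rw [if_neg hcond]
        rw [not_or, not_not] at hcond
        have hbin : b ∈ acc := List.mem_of_getLast? hcond.2
        have hlink' : ∀ a ∈ acc, ∀ c ∈ rest, a ≤ c := fun a ha c hc =>
          hlink a ha c (List.mem_cons_of_mem _ hc)
        obtain ⟨h1, h2⟩ := ih acc hs' hacc hlink'
        refine ⟨h1, fun x => ?_⟩
        rw [h2 x]
        constructor
        · rintro (h | h)
          · exact Or.inl h
          · exact Or.inr (List.mem_cons_of_mem _ h)
        · rintro (h | h)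
          · exact Or.inl h
          · rcases List.mem_cons.mp h with rfl | h
            · exact Or.inl hbin
            · exact Or.inr h

-- ===== VERDICT (by name: the statement is the Claim_ definition above) =====
theorem getHeadList_spec : Claim_equal_getHeadList := by
  intro l _
  unfold Spec_getHeadList getHeadList getHeadList_alt
  simp only [pv_flat_eq]
  set flat := l.flatMap (fun item => item.map Prod.fst) with hflat
  have hA : l.foldl (fun h item => item.foldl (fun h kv => PySem.Set.add h kv.1) h) PySem.Set.empty
      = PySem.Set.ofList flat := by
    rw [pv_setFold_eq]; rw [PySem.Set.ofList_eq_foldl]; rfl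
  rw [hA]
  set s := PySem.List.sorted flat (fun x => x) false with hs
  obtain ⟨hlt, hmem⟩ := pv_dedup_spec s [] (by simpa [hs] using PySem.List.sorted_pairwise (xs := flat) (key := fun x => x)) (List.Pairwise.nil) (by simp)
  set ys := s.foldl (fun head k => if head = [] ∨ head.getLast? ≠ some k then head ++ [k] else head) [] with hys
  have hmem' : ∀ x, x ∈ ys ↔ x ∈ flat := by
    intro x
    rw [hmem x]
    simp [hs, PySem.List.mem_sorted]
  have hnodupys : ys.Nodup := hlt.imp ne_of_lt
  have hperm : ys.Perm (PySem.Set.ofList flat) := by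
    rw [List.perm_ext_iff_of_nodup hnodupys (PySem.Set.nodup_ofList flat)]
    intro x
    rw [hmem' x, PySem.Set.mem_ofList]
  exact PySem.List.sorted_eq_of_perm_of_pairwise_lt _ _ _ hperm hlt
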